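-- pv_equiv track=rewrite | github.com/joaopandolfi/ceten_folha_parsing | lib_processa_ceten.py | processaTags
-- ===== SOURCE A (Python) =====
-- def processaTags(conteudo,arquivo):
-- 	#variaveis
-- 	arqFinal = ""
-- 	result = ""
-- 	stops = ["'",'"']
-- 	inTag = False
-- 	if(conteudo.find("ext") >= 0): #se for um titulo
-- 		#recupero o inico da string cad
-- 		i = conteudo.find("cad") +4 # cad= (deslocamento 4)
-- 		tam = len(conteudo)
-- 		#percorro a string e salvo
-- 		while(i < tam):
-- 			if((conteudo[i] in stops) and not(inTag)):
-- 				inTag = True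
-- 			elif((conteudo[i] in stops) and inTag):
-- 				break
-- 			else:
-- 				result = result + conteudo[i]
-- 			i = i+1
--
-- 		arqFinal = result
--
-- 		#reinicializo variaveis
-- 		inTag = False
-- 		result = ""
-- 		#recupero o inico da string sec
-- 		i = conteudo.find("sec") +4 # sec= (deslocamento 4)
-- 		tam = len(conteudo)
-- 		#percorro a string e salvo
-- 		while(i < tam):
-- 			if((conteudo[i] in stops) and not(inTag)):
-- 				inTag = True
-- 			elif((conteudo[i] in stops) and inTag):
-- 				break
-- 			else:
-- 				result = result + conteudo[i]
-- 			i = i+1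
--
-- 		#monto String
-- 		arqFinal = result+"_"+arqFinal+".data"
-- 		return arqFinal
--
-- 	return arquivo
-- ===== SOURCE B (Python) =====
-- def processaTags(conteudo, arquivo):
--     if conteudo.find("ext") < 0:
--         return arquivo
--
--     def first_quote(s):
--         a, b = s.find("'"), s.find('"')
--         return b if a == -1 else (a if b == -1 else min(a, b))
--
--     def grab(marker):
--         tail = conteudo[conteudo.find(marker) + 4:]
--         p = first_quote(tail)
--         if p == -1:
--             return tail
--         rest = tail[p + 1:]
--         q = first_quote(rest)
--         return tail[:p] + (rest if q == -1 else rest[:q])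
--
--     return grab("sec") + "_" + grab("cad") + ".data"
-- ===== Notes on version B (the rewrite author's own statement) =====
-- stated objective: idiomatic
-- what changed: Replaced A's two stateful char-by-char while loops (inTag flag, character accumulator) with a single helper that locates the first two quote positions via str.find and assembles the result from slices.
import Mathlib
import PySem

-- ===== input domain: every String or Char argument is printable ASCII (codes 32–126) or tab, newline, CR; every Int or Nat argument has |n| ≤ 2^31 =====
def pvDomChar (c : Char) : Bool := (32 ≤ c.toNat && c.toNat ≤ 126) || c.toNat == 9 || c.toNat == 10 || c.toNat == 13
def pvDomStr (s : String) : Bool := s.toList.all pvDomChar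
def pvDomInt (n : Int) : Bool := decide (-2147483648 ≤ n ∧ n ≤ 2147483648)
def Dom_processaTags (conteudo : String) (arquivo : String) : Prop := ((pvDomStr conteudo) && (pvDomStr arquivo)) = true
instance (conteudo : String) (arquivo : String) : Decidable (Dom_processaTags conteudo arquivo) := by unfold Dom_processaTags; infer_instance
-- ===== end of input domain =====

-- B replaces A's two char-by-char while loops by find+slice arithmetic (idiomatic; same cost).

-- ===== PORT A =====
-- membership in A's stops = ["'", '"']
def pvIsStop (c : Char) : Bool := c == '\'' || c == '"'

-- A's while loop: walks the remaining characters with the same (inTag, result) state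
def pvScanA : List Char → Bool → List Char → List Char
  | [], _, result => result
  | c :: rest, inTag, result =>
    if pvIsStop c && !inTag then pvScanA rest true result
    else if pvIsStop c && inTag then result
    else pvScanA rest inTag (result ++ [c])

def processaTags (conteudo : String) (arquivo : String) : String :=
  if 0 ≤ PySem.Str.find conteudo "ext" then
    let cs := conteudo.toList
    let iCad := PySem.Chars.find cs ['c', 'a', 'd'] + 4
    let arqFinal := pvScanA (cs.drop iCad.toNat) false []
    let iSec := PySem.Chars.find cs ['s', 'e', 'c'] + 4
    let result := pvScanA (cs.drop iSec.toNat) false []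
    String.ofList (result ++ ['_'] ++ arqFinal ++ ['.', 'd', 'a', 't', 'a'])
  else arquivo

-- ===== PORT B =====
-- first_quote(s): position of the first ' or " in s, -1 if none
def pvFirstQuote (s : List Char) : Int :=
  let a := PySem.Chars.find s ['\'']
  let b := PySem.Chars.find s ['"']
  if a = -1 then b else if b = -1 then a else min a b

-- grab(marker): tail = conteudo[find(marker)+4:]; slice around the first two quotes
def pvGrab (conteudo : List Char) (marker : List Char) : List Char :=
  let tail := PySem.List.slice conteudo (some (PySem.Chars.find conteudo marker + 4)) none
  let p := pvFirstQuote tail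
  if p = -1 then tail
  else
    let rest := PySem.List.slice tail (some (p + 1)) none
    let q := pvFirstQuote rest
    PySem.List.slice tail none (some p) ++ (if q = -1 then rest else PySem.List.slice rest none (some q))

def processaTags_alt (conteudo : String) (arquivo : String) : String :=
  if PySem.Str.find conteudo "ext" < 0 then arquivo
  else
    let cs := conteudo.toList
    String.ofList (pvGrab cs ['s', 'e', 'c'] ++ ['_'] ++ pvGrab cs ['c', 'a', 'd'] ++ ['.', 'd', 'a', 't', 'a'])

-- ===== PRECONDITION & SPEC =====
def Spec_processaTags (conteudo : String) (arquivo : String) (out : String) : Prop := out = processaTags_alt conteudo arquivo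
instance (conteudo : String) (arquivo : String) (out : String) : Decidable (Spec_processaTags conteudo arquivo out) := by unfold Spec_processaTags; infer_instance

-- ===== CLAIM (what is proved, stated in full; the proofs are below) =====
def Claim_equal_processaTags : Prop := ∀ (conteudo : String) (arquivo : String), Dom_processaTags conteudo arquivo → Spec_processaTags conteudo arquivo (processaTags conteudo arquivo)

-- ===== LEMMAS AND PROOFS =====

theorem pvScanA_true (cs : List Char) : ∀ acc, pvScanA cs true acc = acc ++ cs.takeWhile (fun c => !pvIsStop c) := by
  induction cs with
  | nil => intro acc; simp [pvScanA]
  | cons c rest ih =>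
    intro acc
    cases hc : pvIsStop c <;> simp [pvScanA, hc, ih]

theorem pvScanA_false (cs : List Char) : ∀ acc,
    pvScanA cs false acc =
      acc ++ cs.takeWhile (fun c => !pvIsStop c)
          ++ ((cs.dropWhile (fun c => !pvIsStop c)).tail.takeWhile (fun c => !pvIsStop c)) := by
  induction cs with
  | nil => intro acc; simp [pvScanA]
  | cons c rest ih =>
    intro acc
    cases hc : pvIsStop c
    · simp [pvScanA, hc, ih]
    · simp [pvScanA, hc, pvScanA_true]

theorem singleton_prefix_iff (c : Char) (l : List Char) : [c] <+: l ↔ l.head? = some c := by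
  cases l with
  | nil => simp
  | cons x xs => simp [List.cons_prefix_cons, eq_comm]

theorem singleton_infix_iff (c : Char) (l : List Char) : [c] <:+: l ↔ c ∈ l := by
  constructor
  · intro h; exact h.subset (by simp)
  · intro h
    obtain ⟨s, t, rfl⟩ := List.append_of_mem h
    exact ⟨s, t, by simp⟩

theorem find_singleton_mem {c : Char} {cs : List Char} (h : c ∈ cs) :
    0 ≤ PySem.Chars.find cs [c] ∧
    cs[(PySem.Chars.find cs [c]).toNat]? = some c ∧
    ∀ i < (PySem.Chars.find cs [c]).toNat, cs[i]? ≠ some c := by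
  have h0 : 0 ≤ PySem.Chars.find cs [c] :=
    (PySem.Chars.find_nonneg_iff cs [c]).mpr ((singleton_infix_iff c cs).mpr h)
  obtain ⟨h1, h2⟩ := PySem.Chars.find_spec h0
  refine ⟨h0, ?_, ?_⟩
  · have := (singleton_prefix_iff c _).mp h1
    rwa [List.head?_drop] at this
  · intro i hi hcontra
    exact h2 i hi ((singleton_prefix_iff c _).mpr (by rwa [List.head?_drop]))

theorem find_singleton_not_mem {c : Char} {cs : List Char} (h : c ∉ cs) :
    PySem.Chars.find cs [c] = -1 :=
  (PySem.Chars.find_eq_neg_one_iff cs [c]).mpr (fun hinf => h ((singleton_infix_iff c cs).mp hinf))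

theorem tw_before (p : Char → Bool) (cs : List Char) :
    ∀ i < (cs.takeWhile (fun c => !p c)).length, ∃ x, cs[i]? = some x ∧ p x = false := by
  induction cs with
  | nil => intro i hi; simp at hi
  | cons c rest ih =>
    intro i hi
    by_cases hc : p c
    · simp [hc] at hi
    · cases i with
      | zero => exact ⟨c, by simp, by simpa using hc⟩
      | succ j =>
        simp only [List.takeWhile_cons, hc] at hi
        simp at hi
        obtain ⟨x, hx, hpx⟩ := ih j (by omega)
        exact ⟨x, by simpa using hx, hpx⟩

theorem tw_at (p : Char → Bool) (cs : List Char) (h : cs.any p = true) :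
    ∃ x, cs[(cs.takeWhile (fun c => !p c)).length]? = some x ∧ p x = true := by
  induction cs with
  | nil => simp at h
  | cons c rest ih =>
    by_cases hc : p c
    · exact ⟨c, by simp [hc], hc⟩
    · have h' : rest.any p = true := by simpa [hc] using h
      obtain ⟨x, hx, hpx⟩ := ih h'
      exact ⟨x, by simpa [List.takeWhile_cons, hc] using hx, hpx⟩

theorem tw_all (p : Char → Bool) (cs : List Char) (h : cs.any p = false) :
    cs.takeWhile (fun c => !p c) = cs := by
  rw [List.takeWhile_eq_self_iff]
  intro x hx
  simp only [List.any_eq_false] at h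
  simp [h x hx]

theorem dw_nil (p : Char → Bool) (cs : List Char) (h : cs.any p = false) :
    cs.dropWhile (fun c => !p c) = [] := by
  rw [List.dropWhile_eq_nil_iff]
  intro x hx
  simp only [List.any_eq_false] at h
  simp [h x hx]

theorem any_stop_iff (cs : List Char) : cs.any pvIsStop = true ↔ '\'' ∈ cs ∨ '"' ∈ cs := by
  constructor
  · intro h
    obtain ⟨x, hx, hpx⟩ := List.any_eq_true.mp h
    rcases (by simpa [pvIsStop] using hpx : x = '\'' ∨ x = '"') with rfl | rfl
    · exact Or.inl hx
    · exact Or.inr hx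
  · rintro (h | h)
    · exact List.any_eq_true.mpr ⟨'\'', h, by decide⟩
    · exact List.any_eq_true.mpr ⟨'"', h, by decide⟩

-- the index of the first stop char c coincides with takeWhile-(non-stop) length, when c sits there
theorem find_toNat_eq {c : Char} {cs : List Char} (hstop : pvIsStop c = true)
    (hm : cs[(cs.takeWhile (fun x => !pvIsStop x)).length]? = some c) (h : c ∈ cs) :
    (PySem.Chars.find cs [c]).toNat = (cs.takeWhile (fun x => !pvIsStop x)).length := by
  obtain ⟨h0, h1, h2⟩ := find_singleton_mem h
  rcases Nat.lt_trichotomy (PySem.Chars.find cs [c]).toNat ((cs.takeWhile (fun x => !pvIsStop x)).length) with hlt | heq | hgt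
  · obtain ⟨y, hy, hpy⟩ := tw_before pvIsStop cs _ hlt
    rw [h1] at hy
    injection hy with hy
    subst hy
    rw [hstop] at hpy
    exact Bool.noConfusion hpy
  · exact heq
  · exact absurd hm (h2 _ hgt)

theorem le_find_toNat {c : Char} {cs : List Char} (hstop : pvIsStop c = true) (h : c ∈ cs) :
    (cs.takeWhile (fun x => !pvIsStop x)).length ≤ (PySem.Chars.find cs [c]).toNat := by
  obtain ⟨h0, h1, h2⟩ := find_singleton_mem h
  by_contra hcon
  have hlt : (PySem.Chars.find cs [c]).toNat < (cs.takeWhile (fun x => !pvIsStop x)).length := by omega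
  obtain ⟨y, hy, hpy⟩ := tw_before pvIsStop cs _ hlt
  rw [h1] at hy
  injection hy with hy
  subst hy
  rw [hstop] at hpy
  exact Bool.noConfusion hpy

theorem pvFirstQuote_eq (cs : List Char) :
    pvFirstQuote cs =
      if cs.any pvIsStop then ((cs.takeWhile (fun c => !pvIsStop c)).length : Int) else -1 := by
  simp only [pvFirstQuote]
  by_cases hq : '\'' ∈ cs <;> by_cases hd : '"' ∈ cs
  · -- both quotes present
    have hany : cs.any pvIsStop = true := (any_stop_iff cs).mpr (Or.inl hq)
    obtain ⟨x, hx, hpx⟩ := tw_at pvIsStop cs hany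
    obtain ⟨ha0, -, -⟩ := find_singleton_mem hq
    obtain ⟨hb0, -, -⟩ := find_singleton_mem hd
    rw [if_neg (by omega), if_neg (by omega), if_pos hany]
    rcases (by simpa [pvIsStop] using hpx : x = '\'' ∨ x = '"') with rfl | rfl
    · have hea := find_toNat_eq (by decide) hx hq
      have hlb := le_find_toNat (c := '"') (by decide) hd
      omega
    · have heb := find_toNat_eq (by decide) hx hd
      have hla := le_find_toNat (c := '\'') (by decide) hq
      omega
  · -- only '
    have hany : cs.any pvIsStop = true := (any_stop_iff cs).mpr (Or.inl hq)
    obtain ⟨x, hx, hpx⟩ := tw_at pvIsStop cs hany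
    have hx' : x = '\'' := by
      rcases (by simpa [pvIsStop] using hpx : x = '\'' ∨ x = '"') with rfl | rfl
      · rfl
      · exact absurd (List.mem_of_getElem? hx) hd
    subst hx'
    have hea := find_toNat_eq (by decide) hx hq
    obtain ⟨ha0, -, -⟩ := find_singleton_mem hq
    rw [find_singleton_not_mem hd, if_neg (by omega), if_pos rfl, if_pos hany]
    omega
  · -- only "
    have hany : cs.any pvIsStop = true := (any_stop_iff cs).mpr (Or.inr hd)
    obtain ⟨x, hx, hpx⟩ := tw_at pvIsStop cs hany
    have hx' : x = '"' := by
      rcases (by simpa [pvIsStop] using hpx : x = '\'' ∨ x = '"') with rfl | rfl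
      · exact absurd (List.mem_of_getElem? hx) hq
      · rfl
    subst hx'
    have heb := find_toNat_eq (by decide) hx hd
    obtain ⟨hb0, -, -⟩ := find_singleton_mem hd
    rw [find_singleton_not_mem hq, if_pos rfl, if_pos hany]
    omega
  · -- no quote at all
    have hany : cs.any pvIsStop = false := by
      by_contra hc
      rcases (any_stop_iff cs).mp (Bool.of_not_eq_false hc) with h | h
      · exact hq h
      · exact hd h
    rw [find_singleton_not_mem hq, find_singleton_not_mem hd, if_pos rfl, if_neg (by simp [hany])]

theorem pvGrab_eq (cs marker : List Char) :
    pvGrab cs marker =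
      (cs.drop (PySem.Chars.find cs marker + 4).toNat).takeWhile (fun c => !pvIsStop c) ++
        (((cs.drop (PySem.Chars.find cs marker + 4).toNat).dropWhile (fun c => !pvIsStop c)).tail.takeWhile
          (fun c => !pvIsStop c)) := by
  have h4 : 0 ≤ PySem.Chars.find cs marker + 4 := by
    have := PySem.Chars.neg_one_le_find cs marker; omega
  simp only [pvGrab]
  rw [PySem.List.slice_from cs h4, pvFirstQuote_eq]
  set tail := cs.drop (PySem.Chars.find cs marker + 4).toNat with htail
  by_cases hq : tail.any pvIsStop = true
  · rw [if_pos hq]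
    set m := (tail.takeWhile (fun c => !pvIsStop c)).length with hm
    rw [if_neg (show ¬((m : Int) = -1) by omega)]
    have hslice2 : PySem.List.slice tail none (some (m : Int)) = tail.take m := by
      rw [PySem.List.slice_to tail (by omega), (by omega : ((m : Int)).toNat = m)]
    have hslice1 : PySem.List.slice tail (some ((m : Int) + 1)) none = tail.drop (m + 1) := by
      rw [PySem.List.slice_from tail (by omega), (by omega : ((m : Int) + 1).toNat = m + 1)]
    have htake : tail.take m = tail.takeWhile (fun c => !pvIsStop c) :=
      (List.prefix_iff_eq_take.mp (List.takeWhile_prefix _)).symm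
    have hdrop : tail.drop (m + 1) = (tail.dropWhile (fun c => !pvIsStop c)).tail := by
      conv_lhs => rw [← List.takeWhile_append_dropWhile (p := fun c => !pvIsStop c) (l := tail)]
      rw [hm, List.drop_length_add_append, List.drop_one]
    rw [hslice1, hslice2, htake, hdrop, pvFirstQuote_eq]
    set rest := (tail.dropWhile (fun c => !pvIsStop c)).tail with hrest
    by_cases hq2 : rest.any pvIsStop = true
    · rw [if_pos hq2]
      set m2 := (rest.takeWhile (fun c => !pvIsStop c)).length with hm2
      rw [if_neg (show ¬((m2 : Int) = -1) by omega)]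
      have hslice3 : PySem.List.slice rest none (some (m2 : Int)) = rest.take m2 := by
        rw [PySem.List.slice_to rest (by omega), (by omega : ((m2 : Int)).toNat = m2)]
      rw [hslice3, hm2, (List.prefix_iff_eq_take.mp (List.takeWhile_prefix _)).symm]
    · rw [if_neg hq2, if_pos rfl, tw_all pvIsStop rest (by simpa using hq2)]
  · rw [if_neg hq, if_pos rfl, tw_all pvIsStop tail (by simpa using hq), dw_nil pvIsStop tail (by simpa using hq)]
    simp

-- ===== VERDICT (by name: the statement is the Claim_ definition above) =====
theorem processaTags_spec : Claim_equal_processaTags := by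
  intro conteudo arquivo _
  unfold Spec_processaTags processaTags processaTags_alt
  by_cases hext : 0 ≤ PySem.Str.find conteudo "ext"
  · rw [if_pos hext, if_neg (by omega)]
    simp only []
    congr 1
    rw [pvGrab_eq, pvGrab_eq, pvScanA_false, pvScanA_false]
    simp
  · rw [if_neg hext, if_pos (by omega)]
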